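-- pv_equiv track=rewrite | github.com/hex/iterm2-dimmer | src/taskmaster_triggers.py | _tail_phrases
-- ===== SOURCE A (Python) =====
-- def _tail_phrases(phrases, min_len=10):
--     """For 3+ word phrases, generate all 2+ word tails at least min_len chars.
--     When iTerm2 reflows text on resize, a phrase like "no longer wanted" can
--     split so "longer wanted" lands on its own screen line with no matching
--     trigger. These tails cover those fragments."""
--     subs = set()
--     for p in phrases:
--         words = p.split()
--         for i in range(1, len(words) - 1):
--             tail = " ".join(words[i:])
--             if len(tail) >= min_len:
--                 subs.add(tail)
--     return sorted(subs - set(phrases))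
-- ===== SOURCE B (Python) =====
-- def _tail_phrases(phrases, min_len=10):
--     subs = set()
--     exclude = set(phrases)
--     for p in phrases:
--         words = p.split()
--         n = len(words)
--         if n < 3:
--             continue
--         tail = words[n - 1]
--         tlen = len(tail)
--         for i in range(n - 2, 0, -1):
--             w = words[i]
--             tail = w + " " + tail
--             tlen += len(w) + 1
--             if tlen >= min_len and tail not in exclude:
--                 subs.add(tail)
--     return sorted(subs)
-- ===== Notes on version B (the rewrite author's own statement) =====
-- stated objective: alternative
-- what changed: Instead of rejoining ' '.join(words[i:]) for every i, B makes one backward pass per phrase that extends a running tail string and its tracked length incrementally (words[i] + ' ' + tail), and filters out the phrase set at insertion time rather than by a set difference at the end.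
import Mathlib
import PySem

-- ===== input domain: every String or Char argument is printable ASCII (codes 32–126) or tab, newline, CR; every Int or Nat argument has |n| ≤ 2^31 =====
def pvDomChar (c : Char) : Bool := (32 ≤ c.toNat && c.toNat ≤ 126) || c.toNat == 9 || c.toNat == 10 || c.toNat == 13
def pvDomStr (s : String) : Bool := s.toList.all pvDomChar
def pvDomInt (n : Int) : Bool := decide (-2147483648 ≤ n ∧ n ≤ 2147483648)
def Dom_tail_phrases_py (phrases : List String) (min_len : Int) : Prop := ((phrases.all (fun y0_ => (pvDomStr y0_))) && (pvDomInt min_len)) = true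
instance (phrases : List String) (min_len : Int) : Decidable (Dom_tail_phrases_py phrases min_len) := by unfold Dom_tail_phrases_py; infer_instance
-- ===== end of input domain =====

-- B replaces A's per-tail " ".join(words[i:]) rejoin by one backward pass per phrase that extends
-- the running tail and its tracked length incrementally, filtering the phrase set at insertion
-- instead of a set difference at the end (objective: alternative decomposition, same results).

-- ===== PORT A =====
def tail_phrases_py (phrases : List String) (min_len : Int) : List String :=
  let subs : PySem.Set String :=
    phrases.foldl (fun subs p =>
      let words := PySem.Str.split₀ p
      (PySem.List.pyRange 1 ((words.length : Int) - 1) 1).foldl (fun subs i =>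
        let tail := PySem.Str.join " " (PySem.List.slice words (some i) none)
        if min_len ≤ PySem.Str.len tail then PySem.Set.add subs tail else subs) subs)
      PySem.Set.empty
  PySem.List.sorted (PySem.Set.diff subs (PySem.Set.ofList phrases)) (fun x => x) false

-- ===== PORT B =====
def tail_phrases_py_alt (phrases : List String) (min_len : Int) : List String :=
  let exclude := PySem.Set.ofList phrases
  let subs : PySem.Set String :=
    phrases.foldl (fun subs p =>
      let words := PySem.Str.split₀ p
      let n := words.length
      if n < 3 then subs
      else
        let tail0 := PySem.List.pyGetD words ((n : Int) - 1) ""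
        let st := (PySem.List.pyRange ((n : Int) - 2) 0 (-1)).foldl
          (fun (st : String × Int × PySem.Set String) i =>
            let w := PySem.List.pyGetD words i ""
            let tail := w ++ " " ++ st.1
            let tlen := st.2.1 + PySem.Str.len w + 1
            let subs' := if min_len ≤ tlen ∧ ¬ PySem.Set.contains exclude tail then PySem.Set.add st.2.2 tail else st.2.2
            (tail, tlen, subs'))
          (tail0, PySem.Str.len tail0, subs)
        st.2.2)
      PySem.Set.empty
  PySem.List.sorted subs (fun x => x) false

-- ===== PRECONDITION & SPEC =====
def Spec_tail_phrases_py (phrases : List String) (min_len : Int) (out : List String) : Prop := out = tail_phrases_py_alt phrases min_len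
instance (phrases : List String) (min_len : Int) (out : List String) : Decidable (Spec_tail_phrases_py phrases min_len out) := by unfold Spec_tail_phrases_py; infer_instance

-- ===== CLAIM (what is proved, stated in full; the proofs are below) =====
def Claim_equal_tail_phrases_py : Prop := ∀ (phrases : List String) (min_len : Int), Dom_tail_phrases_py phrases min_len → Spec_tail_phrases_py phrases min_len (tail_phrases_py phrases min_len)

-- ===== LEMMAS AND PROOFS =====

def tailJ (words : List String) (i : Nat) : String := PySem.Str.join " " (words.drop i)

lemma str_join_cons (w q : String) (rest : List String) :
    PySem.Str.join " " (w :: q :: rest) = w ++ " " ++ PySem.Str.join " " (q :: rest) := by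
  apply String.toList_inj.mp
  simp [PySem.Str.toList_join, PySem.Chars.join_cons_cons, String.toList_append]

lemma tailJ_cons (words : List String) (i : Nat) (h : i + 1 < words.length) :
    tailJ words i = words[i] ++ " " ++ tailJ words (i + 1) := by
  unfold tailJ
  rw [List.drop_eq_getElem_cons (by omega)]
  rw [List.drop_eq_getElem_cons (l := words) (h := h)]
  rw [str_join_cons]

lemma len_tailJ_cons (words : List String) (i : Nat) (h : i + 1 < words.length) :
    PySem.Str.len (tailJ words i) = PySem.Str.len words[i] + 1 + PySem.Str.len (tailJ words (i + 1)) := by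
  rw [tailJ_cons words i h, PySem.Str.len_append, PySem.Str.len_append]
  norm_num
  rfl

def bodyB (words : List String) (exclude : PySem.Set String) (min_len : Int)
    (st : String × Int × PySem.Set String) (i : Int) : String × Int × PySem.Set String :=
  let w := PySem.List.pyGetD words i ""
  let tail := w ++ " " ++ st.1
  let tlen := st.2.1 + PySem.Str.len w + 1
  let subs' := if min_len ≤ tlen ∧ ¬ PySem.Set.contains exclude tail then PySem.Set.add st.2.2 tail else st.2.2
  (tail, tlen, subs')

lemma memB_loop (words : List String) (exclude : PySem.Set String) (min_len : Int) :
    ∀ (k : Nat), k + 1 < words.length → ∀ (s : PySem.Set String) (x : String),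
      x ∈ ((PySem.List.pyRange (k : Int) 0 (-1)).foldl (bodyB words exclude min_len)
          (tailJ words (k + 1), PySem.Str.len (tailJ words (k + 1)), s)).2.2 ↔
        x ∈ s ∨ ∃ i : Nat, 1 ≤ i ∧ i ≤ k ∧ min_len ≤ PySem.Str.len (tailJ words i) ∧
          ¬ PySem.Set.contains exclude (tailJ words i) ∧ x = tailJ words i := by
  intro k
  induction k with
  | zero =>
      intro hk s x
      rw [PySem.List.pyRange_neg_one_eq_nil (by norm_num)]
      simp only [List.foldl_nil]
      constructor
      · exact Or.inl
      · rintro (hx | ⟨i, h1, h2, _⟩)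
        · exact hx
        · omega
  | succ k ih =>
      intro hk s x
      have h2 : (k + 1) + 1 < words.length := hk
      have hk' : k + 1 < words.length := by omega
      rw [PySem.List.pyRange_neg_one_cons (by positivity)]
      simp only [List.foldl_cons]
      have hw : PySem.List.pyGetD words ((k + 1 : Nat) : Int) "" = words[k + 1] := by
        rw [PySem.List.pyGetD_natCast, List.getD_eq_getElem _ _ hk']
      have hbody : bodyB words exclude min_len
          (tailJ words (k + 1 + 1), PySem.Str.len (tailJ words (k + 1 + 1)), s) ((k + 1 : Nat) : Int) =
          (tailJ words (k + 1), PySem.Str.len (tailJ words (k + 1)),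
            if min_len ≤ PySem.Str.len (tailJ words (k + 1)) ∧ ¬ PySem.Set.contains exclude (tailJ words (k + 1))
            then PySem.Set.add s (tailJ words (k + 1)) else s) := by
        unfold bodyB
        simp only [hw]
        rw [← tailJ_cons words (k + 1) h2]
        have hlen : PySem.Str.len (tailJ words (k + 1 + 1)) + PySem.Str.len words[k + 1] + 1
            = PySem.Str.len (tailJ words (k + 1)) := by
          rw [len_tailJ_cons words (k + 1) h2]; omega
        rw [hlen]
      rw [show ((k + 1 : Nat) : Int) - 1 = (k : Nat) by push_cast; ring]
      rw [hbody, ih (by omega)]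
      split_ifs with hc
      · rw [PySem.Set.mem_add]
        constructor
        · rintro ((hx | rfl) | ⟨i, h1, hle, hm, hnc, rfl⟩)
          · exact Or.inl hx
          · exact Or.inr ⟨k + 1, by omega, by omega, hc.1, hc.2, rfl⟩
          · exact Or.inr ⟨i, h1, by omega, hm, hnc, rfl⟩
        · rintro (hx | ⟨i, h1, hle, hm, hnc, rfl⟩)
          · exact Or.inl (Or.inl hx)
          · rcases Nat.lt_or_ge i (k + 1) with hi | hi
            · exact Or.inr ⟨i, h1, by omega, hm, hnc, rfl⟩
            · have : i = k + 1 := by omega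
              subst this
              exact Or.inl (Or.inr rfl)
      · constructor
        · rintro (hx | ⟨i, h1, hle, hm, hnc, rfl⟩)
          · exact Or.inl hx
          · exact Or.inr ⟨i, h1, by omega, hm, hnc, rfl⟩
        · rintro (hx | ⟨i, h1, hle, hm, hnc, rfl⟩)
          · exact Or.inl hx
          · rcases Nat.lt_or_ge i (k + 1) with hi | hi
            · exact Or.inr ⟨i, h1, by omega, hm, hnc, rfl⟩
            · have : i = k + 1 := by omega
              subst this
              exact absurd ⟨hm, hnc⟩ hc

lemma nodupB_loop (words : List String) (exclude : PySem.Set String) (min_len : Int) :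
    ∀ (l : List Int) (t : String) (c : Int) (s : PySem.Set String), s.Nodup →
      ((l.foldl (bodyB words exclude min_len) (t, c, s)).2.2).Nodup := by
  intro l
  induction l with
  | nil => intro t c s hs; simpa using hs
  | cons a r ih =>
      intro t c s hs
      simp only [List.foldl_cons]
      rw [show bodyB words exclude min_len (t, c, s) a =
        (PySem.List.pyGetD words a "" ++ " " ++ t, c + PySem.Str.len (PySem.List.pyGetD words a "") + 1,
          if min_len ≤ c + PySem.Str.len (PySem.List.pyGetD words a "") + 1 ∧
              ¬ PySem.Set.contains exclude (PySem.List.pyGetD words a "" ++ " " ++ t)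
          then PySem.Set.add s (PySem.List.pyGetD words a "" ++ " " ++ t) else s) from rfl]
      split_ifs with h
      · exact ih _ _ _ (PySem.Set.nodup_add _ _ hs)
      · exact ih _ _ _ hs
lemma memA_loop (words : List String) (min_len : Int) :
    ∀ (l : List Int) (s : PySem.Set String) (x : String),
      x ∈ l.foldl (fun subs i =>
          let tail := PySem.Str.join " " (PySem.List.slice words (some i) none)
          if min_len ≤ PySem.Str.len tail then PySem.Set.add subs tail else subs) s ↔
        x ∈ s ∨ ∃ i ∈ l, min_len ≤ PySem.Str.len (PySem.Str.join " " (PySem.List.slice words (some i) none)) ∧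
          x = PySem.Str.join " " (PySem.List.slice words (some i) none) := by
  intro l
  induction l with
  | nil => intro s x; simp
  | cons a t ih =>
      intro s x
      simp only [List.foldl_cons]
      split_ifs with h
      · rw [ih]
        simp only [PySem.Set.mem_add, List.mem_cons]
        constructor
        · rintro (((hx | rfl) | ⟨i, hi, hc, rfl⟩))
          · exact Or.inl hx
          · exact Or.inr ⟨a, Or.inl rfl, h, rfl⟩
          · exact Or.inr ⟨i, Or.inr hi, hc, rfl⟩
        · rintro (hx | ⟨i, (rfl | hi), hc, rfl⟩)
          · exact Or.inl (Or.inl hx)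
          · exact Or.inl (Or.inr rfl)
          · exact Or.inr ⟨i, hi, hc, rfl⟩
      · rw [ih]
        constructor
        · rintro (hx | ⟨i, hi, hc, rfl⟩)
          · exact Or.inl hx
          · exact Or.inr ⟨i, List.mem_cons_of_mem _ hi, hc, rfl⟩
        · rintro (hx | ⟨i, hi, hc, rfl⟩)
          · exact Or.inl hx
          · rcases List.mem_cons.mp hi with rfl | hi
            · exact absurd hc h
            · exact Or.inr ⟨i, hi, hc, rfl⟩

lemma nodupA_loop (words : List String) (min_len : Int) :
    ∀ (l : List Int) (s : PySem.Set String), s.Nodup →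
      (l.foldl (fun subs i =>
          let tail := PySem.Str.join " " (PySem.List.slice words (some i) none)
          if min_len ≤ PySem.Str.len tail then PySem.Set.add subs tail else subs) s).Nodup := by
  intro l
  induction l with
  | nil => intro s hs; simpa using hs
  | cons a t ih =>
      intro s hs
      simp only [List.foldl_cons]
      split_ifs with h
      · exact ih _ (PySem.Set.nodup_add _ _ hs)
      · exact ih _ hs

def QA (min_len : Int) (p x : String) : Prop :=
  ∃ i : Nat, 1 ≤ i ∧ i + 1 < (PySem.Str.split₀ p).length ∧
    min_len ≤ PySem.Str.len (tailJ (PySem.Str.split₀ p) i) ∧ x = tailJ (PySem.Str.split₀ p) i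

lemma str_join_singleton (w : String) : PySem.Str.join " " [w] = w := by
  apply String.toList_inj.mp
  simp [PySem.Str.toList_join, PySem.Chars.join_singleton]

def stepA (min_len : Int) (subs : PySem.Set String) (p : String) : PySem.Set String :=
  (PySem.List.pyRange 1 (((PySem.Str.split₀ p).length : Int) - 1) 1).foldl (fun subs i =>
    let tail := PySem.Str.join " " (PySem.List.slice (PySem.Str.split₀ p) (some i) none)
    if min_len ≤ PySem.Str.len tail then PySem.Set.add subs tail else subs) subs

def stepB (exclude : PySem.Set String) (min_len : Int) (subs : PySem.Set String) (p : String) : PySem.Set String :=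
  if (PySem.Str.split₀ p).length < 3 then subs
  else
    ((PySem.List.pyRange (((PySem.Str.split₀ p).length : Int) - 2) 0 (-1)).foldl
      (bodyB (PySem.Str.split₀ p) exclude min_len)
      (PySem.List.pyGetD (PySem.Str.split₀ p) (((PySem.Str.split₀ p).length : Int) - 1) "",
       PySem.Str.len (PySem.List.pyGetD (PySem.Str.split₀ p) (((PySem.Str.split₀ p).length : Int) - 1) ""),
       subs)).2.2

lemma portA_eq (phrases : List String) (min_len : Int) :
    tail_phrases_py phrases min_len =
      PySem.List.sorted (PySem.Set.diff (phrases.foldl (stepA min_len) PySem.Set.empty)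
        (PySem.Set.ofList phrases)) (fun x => x) false := rfl

lemma portB_eq (phrases : List String) (min_len : Int) :
    tail_phrases_py_alt phrases min_len =
      PySem.List.sorted (phrases.foldl (stepB (PySem.Set.ofList phrases) min_len) PySem.Set.empty)
        (fun x => x) false := rfl

lemma mem_outer {R : String → String → Prop}
    (step : PySem.Set String → String → PySem.Set String)
    (hstep : ∀ s p x, x ∈ step s p ↔ x ∈ s ∨ R p x) :
    ∀ (l : List String) (s : PySem.Set String) (x : String),
      x ∈ l.foldl step s ↔ x ∈ s ∨ ∃ p ∈ l, R p x := by
  intro l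
  induction l with
  | nil => intro s x; simp
  | cons p t ih =>
      intro s x
      simp only [List.foldl_cons, ih, hstep]
      constructor
      · rintro ((h | h) | ⟨q, hq, h⟩)
        · exact Or.inl h
        · exact Or.inr ⟨p, by simp, h⟩
        · exact Or.inr ⟨q, by simp [hq], h⟩
      · rintro (h | ⟨q, hq, h⟩)
        · exact Or.inl (Or.inl h)
        · rcases List.mem_cons.mp hq with rfl | hq
          · exact Or.inl (Or.inr h)
          · exact Or.inr ⟨q, hq, h⟩

lemma nodup_outer (step : PySem.Set String → String → PySem.Set String)
    (hstep : ∀ s p, s.Nodup → (step s p).Nodup) :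
    ∀ (l : List String) (s : PySem.Set String), s.Nodup → (l.foldl step s).Nodup := by
  intro l
  induction l with
  | nil => intro s hs; simpa using hs
  | cons p t ih => intro s hs; exact ih _ (hstep s p hs)

lemma hstepA (min_len : Int) (s : PySem.Set String) (p x : String) :
    x ∈ stepA min_len s p ↔ x ∈ s ∨ QA min_len p x := by
  unfold stepA
  rw [memA_loop]
  apply or_congr_right
  constructor
  · rintro ⟨i, hi, hc, rfl⟩
    rw [PySem.List.mem_pyRange_one] at hi
    have h0 : (0 : Int) ≤ i := by omega
    rw [PySem.List.slice_from _ h0] at hc ⊢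
    exact ⟨i.toNat, by omega, by omega, hc, rfl⟩
  · rintro ⟨i, h1, h2, hc, rfl⟩
    refine ⟨(i : Int), ?_, ?_, ?_⟩
    · rw [PySem.List.mem_pyRange_one]; omega
    · rw [PySem.List.slice_from _ (by positivity)]
      simpa [tailJ] using hc
    · rw [PySem.List.slice_from _ (by positivity)]
      simp [tailJ]

lemma nodup_stepA (min_len : Int) (s : PySem.Set String) (p : String) (hs : s.Nodup) :
    (stepA min_len s p).Nodup := by
  unfold stepA
  exact nodupA_loop _ _ _ _ hs

lemma tailJ_last (words : List String) (h : 1 ≤ words.length) :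
    tailJ words (words.length - 1) = words[words.length - 1]'(by omega) := by
  unfold tailJ
  rw [List.drop_eq_getElem_cons (by omega)]
  rw [show words.length - 1 + 1 = words.length from by omega, List.drop_length]
  exact str_join_singleton _

lemma hstepB (phrases : List String) (min_len : Int) (s : PySem.Set String) (p x : String) :
    x ∈ stepB (PySem.Set.ofList phrases) min_len s p ↔
      x ∈ s ∨ (QA min_len p x ∧ x ∉ phrases) := by
  unfold stepB QA
  split_ifs with h
  · constructor
    · exact Or.inl
    · rintro (hx | ⟨⟨i, h1, h2, _⟩, _⟩)
      · exact hx
      · omega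
  · have h1 : 1 ≤ (PySem.Str.split₀ p).length := by omega
    have hg : PySem.List.pyGetD (PySem.Str.split₀ p) (((PySem.Str.split₀ p).length : Int) - 1) "" =
        tailJ (PySem.Str.split₀ p) ((PySem.Str.split₀ p).length - 1) := by
      rw [PySem.List.pyGetD_eq_getElem _ "" (by omega) (by omega)]
      rw [tailJ_last _ h1]
      congr 1
      omega
    rw [hg]
    rw [show ((PySem.Str.split₀ p).length : Int) - 2 = (((PySem.Str.split₀ p).length - 2 : Nat) : Int) from by omega]
    rw [show (PySem.Str.split₀ p).length - 1 = (PySem.Str.split₀ p).length - 2 + 1 from by omega]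
    rw [memB_loop _ _ _ _ (by omega)]
    apply or_congr_right
    constructor
    · rintro ⟨i, hi1, hi2, hm, hnc, rfl⟩
      rw [PySem.Set.contains_iff, PySem.Set.mem_ofList] at hnc
      exact ⟨⟨i, hi1, by omega, hm, rfl⟩, hnc⟩
    · rintro ⟨⟨i, hi1, hi2, hm, rfl⟩, hnx⟩
      refine ⟨i, hi1, by omega, hm, ?_, rfl⟩
      rw [PySem.Set.contains_iff, PySem.Set.mem_ofList]
      exact hnx

lemma nodup_stepB (exclude : PySem.Set String) (min_len : Int) (s : PySem.Set String) (p : String)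
    (hs : s.Nodup) : (stepB exclude min_len s p).Nodup := by
  unfold stepB
  split_ifs with h
  · exact hs
  · exact nodupB_loop _ _ _ _ _ _ _ hs

-- ===== VERDICT (by name: the statement is the Claim_ definition above) =====
theorem tail_phrases_py_spec : Claim_equal_tail_phrases_py := by
  intro phrases min_len _
  unfold Spec_tail_phrases_py
  rw [portA_eq, portB_eq]
  apply PySem.List.sorted_eq_sorted_of_perm _ _ _ (fun a b h => h)
  rw [List.perm_ext_iff_of_nodup
    (PySem.Set.nodup_diff _ _ (nodup_outer _ (nodup_stepA min_len) phrases PySem.Set.empty List.nodup_nil))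
    (nodup_outer _ (nodup_stepB (PySem.Set.ofList phrases) min_len) phrases PySem.Set.empty List.nodup_nil)]
  intro x
  rw [PySem.Set.mem_diff]
  rw [mem_outer _ (hstepA min_len) phrases PySem.Set.empty x]
  rw [mem_outer _ (hstepB phrases min_len) phrases PySem.Set.empty x]
  simp only [PySem.Set.mem_ofList, PySem.Set.empty]
  constructor
  · rintro ⟨(h | ⟨q, hq, hQ⟩), hnx⟩
    · simp at h
    · exact Or.inr ⟨q, hq, hQ, hnx⟩
  · rintro (h | ⟨q, hq, hQ, hnx⟩)
    · simp at h
    · exact ⟨Or.inr ⟨q, hq, hQ⟩, hnx⟩
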